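-- pv_equiv track=rewrite | github.com/Zac-HD/tic-tac-tournament | agents/sam_bots.py | list_of_avaliable_shapes
-- ===== SOURCE A (Python) =====
-- def _rotate_90degrees(board: str) -> str:
--     return "".join([board[i] for i in [6, 3, 0, 7, 4, 1, 8, 5, 2]])
--
-- def rotate_board(board: str, n: int) -> str:
--     assert isinstance(n, int)
--     for _ in range(n % 4):
--         board = _rotate_90degrees(board)
--     return board
--
-- WINNING_SHAPES = {
--     "the gamma": "X.X*X*.*.",
--     "the gamma1": "X*X*X*.*.",
--     "the gamma2": "X.X*X***.",
--     "the gamma3": "X.X*X*.**",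
--     "the cornering": "X.X..*X**",
--     "the cornering1": "X*X..*X**",
--     "the cornering2": "X.X*.*X**",
--     "the cornering3": "X.X.**X**",
--     "the knight (left)": "XP.*.**X*",
--     "the knight (right)": "PX..**X**",
--     "the seven": ".XP*.*X**",
--     "the inverse seven": "X***.*.XX",
--     "the closed perpendicular": "*.*XP.*X*",
--     "the open perpendicular": ".**X**PX.",
--     "the surprise perpendicular": "XX.*X**..",
--     "the surprise perpendicular1": "XX**X**..",
--     "the surprise perpendicular2": "XX.*X***.",
--     "the surprise perpendicular3": "XX.*X**.*",
-- }
--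
-- SHAPE_STRENGTH = {
--     "the gamma": 10509,
--     "the gamma1": 10009,
--     "the gamma2": 10009,
--     "the gamma3": 10009,
--     "the cornering": 10507,
--     "the cornering1": 10007,
--     "the cornering2": 10007,
--     "the cornering3": 10007,
--     "the knight (left)": 0,
--     "the knight (right)": 0,
--     "the seven": 0,
--     "the inverse seven": 0,
--     "the closed perpendicular": 0,
--     "the open perpendicular": 0,
--     "the surprise perpendicular": 10500,
--     "the surprise perpendicular1": 10000,
--     "the surprise perpendicular2": 10000,
--     "the surprise perpendicular3": 10000,
-- }
--
-- def list_of_avaliable_shapes(board: str, use_weights: int = 1) -> list: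
--     avaliable_shapes = []
--
--     sad_moves = [("X", "O"), ("X", "."), ("O", "X"), ("O", "."), ("O", "P")]
--
--     for rot in range(4):
--         rotated_board = rotate_board(board, rot)
--
--         for name, shape in WINNING_SHAPES.items():
--             compare = list(zip(rotated_board, shape))
--
--             # Look for things that would be sad ("O" -> "X", vice versa etc) if we were to get to the full shape
--             # Slightly more efficent (and slightly more obtuse) to use parenthasies below rather than the square brackets which generate a list
--             if not any([sad_move in compare for sad_move in sad_moves]):
--                 # Now that we know its a shape we could get to we need a heuristic for picking
--                 # The fine grain is in the SHAPE_STRENGTH dictionary for X going first, otherwise we just need to check we're not about to be snookered!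
--                 strength = SHAPE_STRENGTH[name] if use_weights else 0
--                 # Loose a 1000 for every X left to make
--                 strength -= 1000 * compare.count((".", "X"))
--                 # Loose 100 for a pivot left to make (and reveal!)
--                 strength -= 100 * compare.count((".", "P"))
--                 avaliable_shapes.append([strength, name, rot])
--
--     avaliable_shapes.sort(reverse=True)
--     return avaliable_shapes
-- ===== SOURCE B (Python) =====
-- # Same ranking, different decomposition: rotations come from precomputed index
-- # permutations (no repeated string rebuilding) and each shape is judged in a
-- # single pass with an early-exit scorer instead of building a pair list and
-- # scanning it with `any` plus two `.count` passes.
--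
-- WINNING_SHAPES = {
--     "the gamma": "X.X*X*.*.",
--     "the gamma1": "X*X*X*.*.",
--     "the gamma2": "X.X*X***.",
--     "the gamma3": "X.X*X*.**",
--     "the cornering": "X.X..*X**",
--     "the cornering1": "X*X..*X**",
--     "the cornering2": "X.X*.*X**",
--     "the cornering3": "X.X.**X**",
--     "the knight (left)": "XP.*.**X*",
--     "the knight (right)": "PX..**X**",
--     "the seven": ".XP*.*X**",
--     "the inverse seven": "X***.*.XX",
--     "the closed perpendicular": "*.*XP.*X*",
--     "the open perpendicular": ".**X**PX.",
--     "the surprise perpendicular": "XX.*X**..",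
--     "the surprise perpendicular1": "XX**X**..",
--     "the surprise perpendicular2": "XX.*X***.",
--     "the surprise perpendicular3": "XX.*X**.*",
-- }
--
-- SHAPE_STRENGTH = {
--     "the gamma": 10509,
--     "the gamma1": 10009,
--     "the gamma2": 10009,
--     "the gamma3": 10009,
--     "the cornering": 10507,
--     "the cornering1": 10007,
--     "the cornering2": 10007,
--     "the cornering3": 10007,
--     "the knight (left)": 0,
--     "the knight (right)": 0,
--     "the seven": 0,
--     "the inverse seven": 0,
--     "the closed perpendicular": 0,
--     "the open perpendicular": 0,
--     "the surprise perpendicular": 10500,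
--     "the surprise perpendicular1": 10000,
--     "the surprise perpendicular2": 10000,
--     "the surprise perpendicular3": 10000,
-- }
--
-- # Index permutations of the 9 cells for 0, 90, 180 and 270 degree rotations.
-- _ROTATIONS = [
--     [0, 1, 2, 3, 4, 5, 6, 7, 8],
--     [6, 3, 0, 7, 4, 1, 8, 5, 2],
--     [8, 7, 6, 5, 4, 3, 2, 1, 0],
--     [2, 5, 8, 1, 4, 7, 0, 3, 6],
-- ]
--
--
-- def _score(cells, shape, base):
--     """Score a board against a shape in one pass; None if the shape is dead."""
--     score = base
--     for c, s in zip(cells, shape):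
--         if c == "X" and s in ("O", "."):
--             return None
--         if c == "O" and s in ("X", ".", "P"):
--             return None
--         if c == ".":
--             if s == "X":
--                 score -= 1000
--             elif s == "P":
--                 score -= 100
--     return score
--
--
-- def list_of_avaliable_shapes(board: str, use_weights: int = 1) -> list:
--     results = []
--     for rot, idxs in enumerate(_ROTATIONS):
--         cells = [board[i] for i in idxs]
--         for name, shape in WINNING_SHAPES.items():
--             score = _score(cells, shape, SHAPE_STRENGTH[name] if use_weights else 0)
--             if score is not None:
--                 results.append([score, name, rot])
--     results.sort(reverse=True)
--     return results
-- ===== Notes on version B (the rewrite author's own statement) =====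
-- stated objective: simpler
-- what changed: Rotated boards are produced by precomputed index permutations instead of repeated 90-degree string rebuilds, and each shape is judged in one early-exit pass that maintains a validity flag and penalty counters instead of building a pair list and scanning it with a membership test plus two .count passes.
import Mathlib
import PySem

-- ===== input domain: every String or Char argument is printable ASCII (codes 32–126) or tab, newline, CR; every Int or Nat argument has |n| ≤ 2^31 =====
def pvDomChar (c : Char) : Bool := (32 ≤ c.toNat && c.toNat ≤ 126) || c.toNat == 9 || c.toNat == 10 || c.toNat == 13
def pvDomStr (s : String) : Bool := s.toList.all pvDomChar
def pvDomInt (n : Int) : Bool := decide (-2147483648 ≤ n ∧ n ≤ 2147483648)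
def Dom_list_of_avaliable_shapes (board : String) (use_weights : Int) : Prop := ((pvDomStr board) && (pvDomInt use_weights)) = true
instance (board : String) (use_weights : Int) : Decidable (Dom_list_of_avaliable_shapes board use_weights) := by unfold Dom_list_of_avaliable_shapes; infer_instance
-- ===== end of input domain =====

-- B differs from A by decomposition: precomputed index permutations replace repeated
-- 90°-rotation rebuilds, and one early-exit pass per shape replaces the pair list
-- scanned by `any` plus two `.count` calls; the ranking returned is identical.

-- ===== PORT A =====

-- shared module constants (identical in Source A and Source B)
def pvWinningShapes : List (String × String) :=
  [("the gamma", "X.X*X*.*."),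
   ("the gamma1", "X*X*X*.*."),
   ("the gamma2", "X.X*X***."),
   ("the gamma3", "X.X*X*.**"),
   ("the cornering", "X.X..*X**"),
   ("the cornering1", "X*X..*X**"),
   ("the cornering2", "X.X*.*X**"),
   ("the cornering3", "X.X.**X**"),
   ("the knight (left)", "XP.*.**X*"),
   ("the knight (right)", "PX..**X**"),
   ("the seven", ".XP*.*X**"),
   ("the inverse seven", "X***.*.XX"),
   ("the closed perpendicular", "*.*XP.*X*"),
   ("the open perpendicular", ".**X**PX."),
   ("the surprise perpendicular", "XX.*X**.."),
   ("the surprise perpendicular1", "XX**X**.."),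
   ("the surprise perpendicular2", "XX.*X***."),
   ("the surprise perpendicular3", "XX.*X**.*")]

def pvShapeStrength : PySem.Dict String Int :=
  PySem.Dict.ofList
  [("the gamma", 10509),
   ("the gamma1", 10009),
   ("the gamma2", 10009),
   ("the gamma3", 10009),
   ("the cornering", 10507),
   ("the cornering1", 10007),
   ("the cornering2", 10007),
   ("the cornering3", 10007),
   ("the knight (left)", 0),
   ("the knight (right)", 0),
   ("the seven", 0),
   ("the inverse seven", 0),
   ("the closed perpendicular", 0),
   ("the open perpendicular", 0),
   ("the surprise perpendicular", 10500),
   ("the surprise perpendicular1", 10000),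
   ("the surprise perpendicular2", 10000),
   ("the surprise perpendicular3", 10000)]

-- sort key for `.sort(reverse=True)` on [strength, name, rot]: Python's lexicographic
-- comparison of the triple (both Pythons perform the identical sort call)
def pvKey (t : Int × String × Int) : Lex (Int × Lex (String × Int)) := toLex (t.1, toLex t.2)

-- boards are kept as `List Char`; Python's "".join over chars is the identity there
def pvRot90 (cs : List Char) : List Char :=
  ([6, 3, 0, 7, 4, 1, 8, 5, 2] : List Int).map (fun i => PySem.List.pyGetD cs i ' ')

def pvRotateBoard (cs : List Char) (n : Int) : List Char :=
  (List.range (PySem.Int.mod n 4).toNat).foldl (fun b _ => pvRot90 b) cs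

def pvSadMoves : List (Char × Char) := [('X','O'), ('X','.'), ('O','X'), ('O','.'), ('O','P')]

def list_of_avaliable_shapes (board : String) (use_weights : Int) : List (Int × String × Int) :=
  let res := (PySem.List.pyRange 0 4 1).foldl (fun acc rot =>
    let rotated := pvRotateBoard board.toList rot
    pvWinningShapes.foldl (fun acc2 ns =>
      let cmp := rotated.zip ns.2.toList
      if !(pvSadMoves.any fun m => cmp.contains m) then
        let strength := (if use_weights ≠ 0 then PySem.Dict.getD pvShapeStrength ns.1 0 else 0)
          - 1000 * (PySem.List.count cmp ('.', 'X') : Int)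
          - 100 * (PySem.List.count cmp ('.', 'P') : Int)
        acc2 ++ [(strength, ns.1, rot)]
      else acc2) acc) []
  PySem.List.sorted res pvKey true

-- ===== PORT B =====

-- _ROTATIONS: index permutations for 0/90/180/270 degrees
def pvRotations : List (List Int) :=
  [[0, 1, 2, 3, 4, 5, 6, 7, 8],
   [6, 3, 0, 7, 4, 1, 8, 5, 2],
   [8, 7, 6, 5, 4, 3, 2, 1, 0],
   [2, 5, 8, 1, 4, 7, 0, 3, 6]]

-- _score: one pass over zip(cells, shape), early exit on a dead shape
def pvScore : List (Char × Char) → Int → Option Int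
  | [], score => some score
  | (c, s) :: rest, score =>
    if c = 'X' ∧ (s = 'O' ∨ s = '.') then none
    else if c = 'O' ∧ (s = 'X' ∨ s = '.' ∨ s = 'P') then none
    else pvScore rest
      (if c = '.' then (if s = 'X' then score - 1000 else if s = 'P' then score - 100 else score)
       else score)

-- `if score is not None: results.append([score, name, rot])`
def pvAppendIfAlive (acc : List (Int × String × Int)) (name : String) (rot : Int) :
    Option Int → List (Int × String × Int)
  | some sc => acc ++ [(sc, name, rot)]
  | none => acc

def list_of_avaliable_shapes_alt (board : String) (use_weights : Int) : List (Int × String × Int) :=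
  let results := (PySem.List.enumerate pvRotations).foldl (fun acc ri =>
    let cells := ri.2.map (fun i => PySem.List.pyGetD board.toList i ' ')
    pvWinningShapes.foldl (fun acc2 ns =>
      pvAppendIfAlive acc2 ns.1 ri.1
        (pvScore (cells.zip ns.2.toList)
          (if use_weights ≠ 0 then PySem.Dict.getD pvShapeStrength ns.1 0 else 0))) acc) []
  PySem.List.sorted results pvKey true

-- ===== PRECONDITION & SPEC =====
-- A indexes board[0..8] while rotating, so it raises IndexError whenever len(board) < 9;
-- Pre_ excludes exactly those inputs (A returns normally on every board of length ≥ 9).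
def Pre_list_of_avaliable_shapes (board : String) (use_weights : Int) : Prop :=
  9 ≤ board.toList.length
instance (board : String) (use_weights : Int) : Decidable (Pre_list_of_avaliable_shapes board use_weights) := by unfold Pre_list_of_avaliable_shapes; infer_instance

def pvWitness_list_of_avaliable_shapes : String × Int := ("X.X*X*.*.", 1)

def Spec_list_of_avaliable_shapes (board : String) (use_weights : Int) (out : List (Int × String × Int)) : Prop := out = list_of_avaliable_shapes_alt board use_weights
instance (board : String) (use_weights : Int) (out : List (Int × String × Int)) : Decidable (Spec_list_of_avaliable_shapes board use_weights out) := by unfold Spec_list_of_avaliable_shapes; infer_instance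

-- ===== CLAIM (what is proved, stated in full; the proofs are below) =====
def Claim_equal_list_of_avaliable_shapes : Prop := ∀ (board : String) (use_weights : Int), Dom_list_of_avaliable_shapes board use_weights → Pre_list_of_avaliable_shapes board use_weights → Spec_list_of_avaliable_shapes board use_weights (list_of_avaliable_shapes board use_weights)

-- ===== LEMMAS AND PROOFS =====

-- B's single-pass scorer computed in closed form: dead iff a sad pair occurs,
-- otherwise the base minus the two weighted pair counts (A's formula).
theorem pvScore_spec (ps : List (Char × Char)) (base : Int) :
    pvScore ps base =
      if pvSadMoves.any (fun m => ps.contains m) then none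
      else some (base - 1000 * (PySem.List.count ps ('.', 'X') : Int)
                      - 100 * (PySem.List.count ps ('.', 'P') : Int)) := by
  induction ps generalizing base with
  | nil => simp [pvScore, PySem.List.count]
  | cons p t ih =>
    obtain ⟨c, s⟩ := p
    simp only [pvScore]
    by_cases h1 : c = 'X' ∧ (s = 'O' ∨ s = '.')
    · rw [if_pos h1]
      have hsad : (pvSadMoves.any fun m => ((c, s) :: t).contains m) = true := by
        obtain ⟨rfl, h⟩ := h1; rcases h with rfl | rfl <;> simp [pvSadMoves]
      rw [hsad]; rfl
    · rw [if_neg h1]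
      by_cases h2 : c = 'O' ∧ (s = 'X' ∨ s = '.' ∨ s = 'P')
      · rw [if_pos h2]
        have hsad : (pvSadMoves.any fun m => ((c, s) :: t).contains m) = true := by
          obtain ⟨rfl, h⟩ := h2; rcases h with rfl | rfl | rfl <;> simp [pvSadMoves]
        rw [hsad]; rfl
      · rw [if_neg h2, ih]
        have hx1 : ¬('X' = c ∧ 'O' = s) := fun ⟨a, b⟩ => h1 ⟨a.symm, Or.inl b.symm⟩
        have hx2 : ¬('X' = c ∧ '.' = s) := fun ⟨a, b⟩ => h1 ⟨a.symm, Or.inr b.symm⟩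
        have hx3 : ¬('O' = c ∧ 'X' = s) := fun ⟨a, b⟩ => h2 ⟨a.symm, Or.inl b.symm⟩
        have hx4 : ¬('O' = c ∧ '.' = s) := fun ⟨a, b⟩ => h2 ⟨a.symm, Or.inr (Or.inl b.symm)⟩
        have hx5 : ¬('O' = c ∧ 'P' = s) := fun ⟨a, b⟩ => h2 ⟨a.symm, Or.inr (Or.inr b.symm)⟩
        have hsad : (pvSadMoves.any fun m => ((c, s) :: t).contains m)
            = (pvSadMoves.any fun m => t.contains m) := by
          simp [pvSadMoves, hx1, hx2, hx3, hx4, hx5]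
        rw [hsad]
        cases hs : (pvSadMoves.any fun m => t.contains m)
        · simp only [PySem.List.count, List.count_cons, beq_iff_eq, Prod.mk.injEq]
          split_ifs <;> simp_all <;> omega
        · rfl

theorem pvAppendIfAlive_score (acc : List (Int × String × Int)) (name : String) (rot : Int)
    (ps : List (Char × Char)) (base : Int) :
    pvAppendIfAlive acc name rot (pvScore ps base) =
      if !(pvSadMoves.any fun m => ps.contains m) then
        acc ++ [(base - 1000 * (PySem.List.count ps ('.', 'X') : Int)
                      - 100 * (PySem.List.count ps ('.', 'P') : Int), name, rot)]
      else acc := by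
  rw [pvScore_spec]
  cases h : (pvSadMoves.any fun m => ps.contains m) <;> rfl

theorem pvSplit9 (l : List Char) (h : 9 ≤ l.length) :
    ∃ c0 c1 c2 c3 c4 c5 c6 c7 c8 rest,
      l = c0 :: c1 :: c2 :: c3 :: c4 :: c5 :: c6 :: c7 :: c8 :: rest := by
  match l, h with
  | c0 :: c1 :: c2 :: c3 :: c4 :: c5 :: c6 :: c7 :: c8 :: rest, _ =>
    exact ⟨c0, c1, c2, c3, c4, c5, c6, c7, c8, rest, rfl⟩

-- the inner fold over the 18 shapes: A's membership-test-plus-counts body equals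
-- B's single-pass body whenever the compared pair lists agree shape by shape
theorem pvInner_eq (w rotA rotB : Int) (r cells : List Char)
    (hz : ∀ ns ∈ pvWinningShapes, r.zip ns.2.toList = cells.zip ns.2.toList)
    (hrot : rotA = rotB) (acc : List (Int × String × Int)) :
    pvWinningShapes.foldl (fun acc2 ns =>
      if !(pvSadMoves.any fun m => (r.zip ns.2.toList).contains m) then
        acc2 ++ [((if w ≠ 0 then PySem.Dict.getD pvShapeStrength ns.1 0 else 0)
          - 1000 * (PySem.List.count (r.zip ns.2.toList) ('.', 'X') : Int)
          - 100 * (PySem.List.count (r.zip ns.2.toList) ('.', 'P') : Int), ns.1, rotA)]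
      else acc2) acc
    = pvWinningShapes.foldl (fun acc2 ns =>
      pvAppendIfAlive acc2 ns.1 rotB
        (pvScore (cells.zip ns.2.toList)
          (if w ≠ 0 then PySem.Dict.getD pvShapeStrength ns.1 0 else 0))) acc := by
  subst hrot
  apply PySem.List.foldl_congr_mem
  intro acc2 ns hns
  rw [pvAppendIfAlive_score, hz ns hns]

theorem pvTake9_zip (c0 c1 c2 c3 c4 c5 c6 c7 c8 : Char) (rest : List Char) :
    ∀ ns ∈ pvWinningShapes,
      ((c0 :: c1 :: c2 :: c3 :: c4 :: c5 :: c6 :: c7 :: c8 :: rest).zip ns.2.toList)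
        = (([c0, c1, c2, c3, c4, c5, c6, c7, c8] : List Char).zip ns.2.toList) := by
  intro ns hns
  fin_cases hns <;> simp [List.zip_nil_right]

-- ===== VERDICT (by name: the statement is the Claim_ definition above) =====
set_option maxHeartbeats 1000000 in
theorem list_of_avaliable_shapes_spec : Claim_equal_list_of_avaliable_shapes := by
  intro board w _ hpre
  unfold Spec_list_of_avaliable_shapes
  obtain ⟨c0, c1, c2, c3, c4, c5, c6, c7, c8, rest, hsplit⟩ := pvSplit9 board.toList hpre
  unfold list_of_avaliable_shapes list_of_avaliable_shapes_alt
  rw [hsplit]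
  have g0 : PySem.List.pyGetD (c0 :: c1 :: c2 :: c3 :: c4 :: c5 :: c6 :: c7 :: c8 :: rest) (0 : Int) ' ' = c0 := by
    simp [PySem.List.pyGetD_ofNat', List.getD]
  have g1 : PySem.List.pyGetD (c0 :: c1 :: c2 :: c3 :: c4 :: c5 :: c6 :: c7 :: c8 :: rest) (1 : Int) ' ' = c1 := by
    simp [PySem.List.pyGetD_ofNat', List.getD]
  have g2 : PySem.List.pyGetD (c0 :: c1 :: c2 :: c3 :: c4 :: c5 :: c6 :: c7 :: c8 :: rest) (2 : Int) ' ' = c2 := by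
    simp [PySem.List.pyGetD_ofNat', List.getD]
  have g3 : PySem.List.pyGetD (c0 :: c1 :: c2 :: c3 :: c4 :: c5 :: c6 :: c7 :: c8 :: rest) (3 : Int) ' ' = c3 := by
    simp [PySem.List.pyGetD_ofNat', List.getD]
  have g4 : PySem.List.pyGetD (c0 :: c1 :: c2 :: c3 :: c4 :: c5 :: c6 :: c7 :: c8 :: rest) (4 : Int) ' ' = c4 := by
    simp [PySem.List.pyGetD_ofNat', List.getD]
  have g5 : PySem.List.pyGetD (c0 :: c1 :: c2 :: c3 :: c4 :: c5 :: c6 :: c7 :: c8 :: rest) (5 : Int) ' ' = c5 := by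
    simp [PySem.List.pyGetD_ofNat', List.getD]
  have g6 : PySem.List.pyGetD (c0 :: c1 :: c2 :: c3 :: c4 :: c5 :: c6 :: c7 :: c8 :: rest) (6 : Int) ' ' = c6 := by
    simp [PySem.List.pyGetD_ofNat', List.getD]
  have g7 : PySem.List.pyGetD (c0 :: c1 :: c2 :: c3 :: c4 :: c5 :: c6 :: c7 :: c8 :: rest) (7 : Int) ' ' = c7 := by
    simp [PySem.List.pyGetD_ofNat', List.getD]
  have g8 : PySem.List.pyGetD (c0 :: c1 :: c2 :: c3 :: c4 :: c5 :: c6 :: c7 :: c8 :: rest) (8 : Int) ' ' = c8 := by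
    simp [PySem.List.pyGetD_ofNat', List.getD]
  have r0 : pvRotateBoard (c0 :: c1 :: c2 :: c3 :: c4 :: c5 :: c6 :: c7 :: c8 :: rest) 0
      = c0 :: c1 :: c2 :: c3 :: c4 :: c5 :: c6 :: c7 :: c8 :: rest := rfl
  have r1 : pvRotateBoard (c0 :: c1 :: c2 :: c3 :: c4 :: c5 :: c6 :: c7 :: c8 :: rest) 1
      = [c6, c3, c0, c7, c4, c1, c8, c5, c2] := by
    simp [pvRotateBoard, pvRot90, PySem.List.pyGetD_ofNat', List.getD, List.range_succ]
  have r2 : pvRotateBoard (c0 :: c1 :: c2 :: c3 :: c4 :: c5 :: c6 :: c7 :: c8 :: rest) 2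
      = [c8, c7, c6, c5, c4, c3, c2, c1, c0] := by
    simp [pvRotateBoard, pvRot90, PySem.List.pyGetD_ofNat', List.getD, List.range_succ]
  have r3 : pvRotateBoard (c0 :: c1 :: c2 :: c3 :: c4 :: c5 :: c6 :: c7 :: c8 :: rest) 3
      = [c2, c5, c8, c1, c4, c7, c0, c3, c6] := by
    simp [pvRotateBoard, pvRot90, PySem.List.pyGetD_ofNat', List.getD, List.range_succ]
  rw [show PySem.List.pyRange 0 4 1 = [0, 1, 2, 3] by decide]
  simp only [pvRotations, PySem.List.enumerate_cons, PySem.List.enumerate_nil,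
    List.foldl_cons, List.foldl_nil, List.map_cons, List.map_nil, Int.reduceAdd,
    r0, r1, r2, r3, g0, g1, g2, g3, g4, g5, g6, g7, g8]
  rw [pvInner_eq w 0 0 _ _ (pvTake9_zip c0 c1 c2 c3 c4 c5 c6 c7 c8 rest) rfl,
      pvInner_eq w 1 1 _ _ (fun ns _ => rfl) rfl,
      pvInner_eq w 2 2 _ _ (fun ns _ => rfl) rfl,
      pvInner_eq w 3 3 _ _ (fun ns _ => rfl) rfl]
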